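-- pv_equiv track=rewrite | github.com/logicslayyer/Regular_expression_VM | regex_parser.py | _desugar_unary_ops
-- ===== SOURCE A (Python) =====
-- def _find_matching_paren(regex, open_index):
--     depth = 0
--     for i in range(open_index, len(regex)):
--         if regex[i] == '(':
--             depth += 1
--         elif regex[i] == ')':
--             depth -= 1
--             if depth == 0:
--                 return i
--     raise ValueError("Unbalanced parentheses in regular expression.")
--
-- def _desugar_unary_ops(regex):
--     """
--     Expands postfix unary operators before the main parser sees the regex.
--     - a+  -> aa*
--     - a?  -> (a|ε)
--     Parenthesized groups are handled recursively.
--     """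
--     result = []
--     i = 0
--
--     while i < len(regex):
--         ch = regex[i]
--
--         if ch in {'+', '?'}:
--             raise ValueError(f"Unexpected unary operator '{ch}' in regular expression.")
--
--         if ch == '(':
--             end = _find_matching_paren(regex, i)
--             atom = f"({_desugar_unary_ops(regex[i + 1:end])})"
--             i = end + 1
--         else:
--             atom = ch
--             i += 1
--
--         # Keep the existing core operators intact.
--         if atom in {'|', '.', '*'}:
--             result.append(atom)
--             continue
--
--         while i < len(regex) and regex[i] in {'+', '?'}:
--             if regex[i] == '+':
--                 atom = f"{atom}{atom}*"
--             else:
--                 atom = f"({atom}|ε)"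
--             i += 1
--
--         result.append(atom)
--
--     return "".join(result)
-- ===== SOURCE B (Python) =====
-- def _desugar_unary_ops(regex):
--     """
--     Expands postfix unary operators before the main parser sees the regex.
--     - a+  -> aa*
--     - a?  -> (a|ε)
--     Iterative stack machine: one pass over the characters, pushing a fresh
--     atom list at '(' and popping it into a group atom at the matching ')';
--     '+'/'?' rewrite the last atom of the current list in place.  No
--     recursion, no matching-paren rescans, no string re-slicing.
--     """
--     stack = [[]]
--     for ch in regex:
--         if ch in ('+', '?'):
--             if not stack[-1]:
--                 raise ValueError(f"Unexpected unary operator '{ch}' in regular expression.")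
--             a = stack[-1][-1]
--             if a in ('|', '.', '*'):
--                 raise ValueError(f"Unexpected unary operator '{ch}' in regular expression.")
--             stack[-1][-1] = a + a + '*' if ch == '+' else f"({a}|ε)"
--         elif ch == '(':
--             stack.append([])
--         elif ch == ')' and len(stack) > 1:
--             group = f"({''.join(stack.pop())})"
--             stack[-1].append(group)
--         else:
--             stack[-1].append(ch)
--     if len(stack) > 1:
--         raise ValueError("Unbalanced parentheses in regular expression.")
--     return ''.join(stack[0])
-- ===== Notes on version B (the rewrite author's own statement) =====
-- stated objective: faster
-- what changed: Replaces A's recursion with matching-paren rescans and string re-slicing by an iterative single-pass stack machine: '(' pushes a fresh atom list, ')' pops it into a group atom, '+'/'?' rewrite the last atom of the current list in place.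
import Mathlib
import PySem

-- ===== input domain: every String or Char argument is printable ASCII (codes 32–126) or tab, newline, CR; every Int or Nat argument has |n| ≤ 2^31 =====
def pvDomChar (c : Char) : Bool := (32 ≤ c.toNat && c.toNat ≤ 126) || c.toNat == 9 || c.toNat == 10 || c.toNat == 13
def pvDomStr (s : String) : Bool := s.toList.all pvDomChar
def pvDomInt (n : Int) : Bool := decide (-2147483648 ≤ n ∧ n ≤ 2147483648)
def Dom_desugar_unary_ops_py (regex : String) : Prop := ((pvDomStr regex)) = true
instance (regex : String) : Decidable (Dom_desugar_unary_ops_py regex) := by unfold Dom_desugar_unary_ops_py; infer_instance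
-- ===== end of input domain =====

set_option maxHeartbeats 1000000

-- ===== PORT A =====
-- B replaces A's recursion (with per-group matching-paren rescans and string
-- re-slicing) by an iterative single-pass stack machine (objective: faster).

-- port of _find_matching_paren (none = ValueError "Unbalanced parentheses")
def pvFindMatch (l : List Char) (i : Nat) (depth : Int) : Option Nat :=
  if h : i < l.length then
    if l[i] = '(' then pvFindMatch l (i + 1) (depth + 1)
    else if l[i] = ')' then
      if depth - 1 = 0 then some i else pvFindMatch l (i + 1) (depth - 1)
    else pvFindMatch l (i + 1) depth
  else none
termination_by l.length - i
decreasing_by all_goals exact Nat.sub_succ_lt_self _ _ h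

-- the inner while-loop of _desugar_unary_ops consuming '+'/'?'
def pvUnaryA (l : List Char) (i : Nat) (atom : String) : String × Nat :=
  if h : i < l.length then
    if l[i] = '+' then pvUnaryA l (i + 1) (atom ++ atom ++ "*")
    else if l[i] = '?' then pvUnaryA l (i + 1) ("(" ++ atom ++ "|ε)")
    else (atom, i)
  else (atom, i)
termination_by l.length - i
decreasing_by all_goals exact Nat.sub_succ_lt_self _ _ h

-- needed by pvLoopA's termination argument
theorem pvUnaryA_ge (l : List Char) (i : Nat) (a : String) : i ≤ (pvUnaryA l i a).2 := by
  rw [pvUnaryA]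
  split_ifs with h h1 h2
  · have := pvUnaryA_ge l (i + 1) (a ++ a ++ "*"); omega
  · have := pvUnaryA_ge l (i + 1) ("(" ++ a ++ "|ε)"); omega
  · simp
  · simp
termination_by l.length - i
decreasing_by all_goals exact Nat.sub_succ_lt_self _ _ h

-- needed by pvLoopA's termination argument (the recursion on a slice shrinks the list)
theorem pvSliceLen (l : List Char) (i e : Nat) (hb : i ≤ e ∧ e < l.length) :
    (PySem.List.slice l (some ((i : Int) + 1)) (some (e : Int))).length < l.length := by
  have hc : ((i : Int) + 1) = ((i + 1 : Nat) : Int) := by push_cast; ring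
  rw [hc, PySem.List.slice_natCast]
  simp only [List.length_take, List.length_drop]
  omega

-- the main while-loop of _desugar_unary_ops; the result list is joined at return
-- (none = ValueError; the dite guard below only makes the recursion total — it
-- always holds on a returned match, so no behaviour is added)
def pvLoopA (l : List Char) (i : Nat) (res : List String) : Option (List String) :=
  if h : i < l.length then
    if l[i] = '+' ∨ l[i] = '?' then none
    else if l[i] = '(' then
      (pvFindMatch l i 0).bind (fun e =>
        if hb : i ≤ e ∧ e < l.length then
          (pvLoopA (PySem.List.slice l (some ((i : Int) + 1)) (some (e : Int))) 0 []).bind (fun inner =>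
            if ("(" ++ String.join inner ++ ")") = "|" ∨ ("(" ++ String.join inner ++ ")") = "." ∨ ("(" ++ String.join inner ++ ")") = "*" then
              pvLoopA l (e + 1) (res ++ [("(" ++ String.join inner ++ ")")])
            else
              pvLoopA l (pvUnaryA l (e + 1) ("(" ++ String.join inner ++ ")")).2
                (res ++ [(pvUnaryA l (e + 1) ("(" ++ String.join inner ++ ")")).1]))
        else none)
    else
      if String.ofList [l[i]] = "|" ∨ String.ofList [l[i]] = "." ∨ String.ofList [l[i]] = "*" then
        pvLoopA l (i + 1) (res ++ [String.ofList [l[i]]])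
      else
        pvLoopA l (pvUnaryA l (i + 1) (String.ofList [l[i]])).2
          (res ++ [(pvUnaryA l (i + 1) (String.ofList [l[i]])).1])
  else some res
termination_by (l.length, l.length - i)
decreasing_by
  · exact Prod.Lex.left _ _ (pvSliceLen l i e hb)
  · exact Prod.Lex.right _ (Nat.sub_lt_sub_left h (Nat.lt_succ_of_le hb.1))
  · exact Prod.Lex.right _ (Nat.sub_lt_sub_left h
      (Nat.lt_of_lt_of_le (Nat.lt_succ_of_le hb.1) (pvUnaryA_ge _ _ _)))
  · exact Prod.Lex.right _ (Nat.sub_succ_lt_self _ _ h)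
  · exact Prod.Lex.right _ (Nat.sub_lt_sub_left h
      (Nat.lt_of_lt_of_le (Nat.lt_succ_self i) (pvUnaryA_ge _ _ _)))

def desugar_unary_ops_py (regex : String) : String :=
  match pvLoopA regex.toList 0 [] with
  | some r => String.join r   -- "".join(result)
  | none => ""                -- ValueError (excluded by Pre_)

-- ===== PORT B =====

-- B's stack machine: state = current atom list (newest first) + stack of
-- suspended outer atom lists; none = ValueError
def pvMachine : List Char → List String → List (List String) → Option String
  | [], cur, stk =>
    match stk with
    | [] => some (String.join cur.reverse)      -- return ''.join(stack[0])
    | _ :: _ => none                            -- unbalanced parentheses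
  | c :: rest, cur, stk =>
    if c = '+' ∨ c = '?' then
      match cur with
      | [] => none                              -- no atom to apply to
      | a :: t =>
        if a = "|" ∨ a = "." ∨ a = "*" then none
        else pvMachine rest ((if c = '+' then a ++ a ++ "*" else "(" ++ a ++ "|ε)") :: t) stk
    else if c = '(' then
      pvMachine rest [] (cur :: stk)
    else if c = ')' then
      match stk with
      | outer :: more => pvMachine rest (("(" ++ String.join cur.reverse ++ ")") :: outer) more
      | [] => pvMachine rest (String.ofList [c] :: cur) []   -- stray ')' is a literal
    else
      pvMachine rest (String.ofList [c] :: cur) stk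

def desugar_unary_ops_py_alt (regex : String) : String :=
  match pvMachine regex.toList [] [] with
  | some s => s
  | none => ""                -- ValueError (excluded by Pre_)

-- ===== PRECONDITION & SPEC =====

-- floor-style paren balance: a ')' at depth 0 is an ordinary character (as in A)
def pvBal : List Char → Nat → Nat
  | [], d => d
  | c :: t, d => pvBal t (if c = '(' then d + 1 else if c = ')' then d - 1 else d)

-- Pre_ excludes exactly the inputs on which A raises ValueError: an unmatched '('
-- or a '+'/'?' at the start or right after one of '(', '|', '.', '*'.
def Pre_desugar_unary_ops_py (regex : String) : Prop :=
  pvBal regex.toList 0 = 0 ∧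
  ∀ j, j < regex.toList.length → (regex.toList[j]? = some '+' ∨ regex.toList[j]? = some '?') →
    (j ≠ 0 ∧ regex.toList[j - 1]? ∉ [some '(', some '|', some '.', some '*'])
instance (regex : String) : Decidable (Pre_desugar_unary_ops_py regex) := by
  unfold Pre_desugar_unary_ops_py; infer_instance

def pvWitness_desugar_unary_ops_py : String := "a+"

def Spec_desugar_unary_ops_py (regex : String) (out : String) : Prop := out = desugar_unary_ops_py_alt regex
instance (regex : String) (out : String) : Decidable (Spec_desugar_unary_ops_py regex out) := by unfold Spec_desugar_unary_ops_py; infer_instance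

-- ===== CLAIM (what is proved, stated in full; the proofs are below) =====
def Claim_equal_desugar_unary_ops_py : Prop := ∀ (regex : String), Dom_desugar_unary_ops_py regex → Pre_desugar_unary_ops_py regex → Spec_desugar_unary_ops_py regex (desugar_unary_ops_py regex)

-- ===== LEMMAS AND PROOFS =====

-- proof-layer bridge: an index-threading recursive descent equivalent to BOTH the
-- slice-recursing loop of port A (pvMain) and the stack machine of port B (pvSim)

-- the unary while-loop, proof-layer copy used by the bridge pvParseB
def pvUnaryB (l : List Char) (i : Nat) (atom : String) : String × Nat :=
  if h : i < l.length then
    if l[i] = '+' then pvUnaryB l (i + 1) (atom ++ atom ++ "*")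
    else if l[i] = '?' then pvUnaryB l (i + 1) ("(" ++ atom ++ "|ε)")
    else (atom, i)
  else (atom, i)
termination_by l.length - i

theorem pvUnaryB_ge (l : List Char) (i : Nat) (a : String) : i ≤ (pvUnaryB l i a).2 := by
  rw [pvUnaryB]
  split_ifs with h h1 h2
  · have := pvUnaryB_ge l (i + 1) (a ++ a ++ "*"); omega
  · have := pvUnaryB_ge l (i + 1) ("(" ++ a ++ "|ε)"); omega
  · simp
  · simp
termination_by l.length - i
decreasing_by all_goals omega

-- the bridge: parse(i, nested) returning (text, stop index); none = ValueError
def pvParseB (l : List Char) (i : Nat) (nested : Bool) (parts : List String) : Option (String × Nat) :=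
  if h : i < l.length then
    if l[i] = '+' ∨ l[i] = '?' then none
    else if l[i] = ')' ∧ nested = true then some (String.join parts, i)
    else if l[i] = '(' then
      (pvParseB l (i + 1) true []).bind (fun ij =>
        if hjl : ij.2 < l.length then
          if hij : i < ij.2 then
            if ("(" ++ ij.1 ++ ")") = "|" ∨ ("(" ++ ij.1 ++ ")") = "." ∨ ("(" ++ ij.1 ++ ")") = "*" then
              pvParseB l (ij.2 + 1) nested (parts ++ [("(" ++ ij.1 ++ ")")])
            else
              pvParseB l (pvUnaryB l (ij.2 + 1) ("(" ++ ij.1 ++ ")")).2 nested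
                (parts ++ [(pvUnaryB l (ij.2 + 1) ("(" ++ ij.1 ++ ")")).1])
          else none
        else none)
    else
      if String.ofList [l[i]] = "|" ∨ String.ofList [l[i]] = "." ∨ String.ofList [l[i]] = "*" then
        pvParseB l (i + 1) nested (parts ++ [String.ofList [l[i]]])
      else
        pvParseB l (pvUnaryB l (i + 1) (String.ofList [l[i]])).2 nested
          (parts ++ [(pvUnaryB l (i + 1) (String.ofList [l[i]])).1])
  else some (String.join parts, i)
termination_by l.length - i
decreasing_by
  · omega
  · omega
  · have := pvUnaryB_ge l (ij.2 + 1) ("(" ++ ij.1 ++ ")"); omega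
  · omega
  · have := pvUnaryB_ge l (i + 1) (String.ofList [l[i]]); omega

-- specification scan: position of the first ')' at relative depth 0 from position i
def pvStray (l : List Char) (i : Nat) (d : Nat) : Option Nat :=
  if h : i < l.length then
    if l[i] = '(' then pvStray l (i + 1) (d + 1)
    else if l[i] = ')' then
      if d = 0 then some i else pvStray l (i + 1) (d - 1)
    else pvStray l (i + 1) d
  else none
termination_by l.length - i

theorem pvStray_end (l : List Char) (i : Nat) (d : Nat) (h : ¬ i < l.length) : pvStray l i d = none := by
  rw [pvStray]; simp [h]

theorem pvStray_open (l : List Char) (i : Nat) (d : Nat) (h : i < l.length) (h1 : l[i] = '(') :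
    pvStray l i d = pvStray l (i + 1) (d + 1) := by
  rw [pvStray]; simp [h, h1]

theorem pvStray_close0 (l : List Char) (i : Nat) (h : i < l.length) (h1 : l[i] = ')') :
    pvStray l i 0 = some i := by
  rw [pvStray]; simp [h, h1]

theorem pvStray_closeS (l : List Char) (i : Nat) (d : Nat) (h : i < l.length) (h1 : l[i] = ')') :
    pvStray l i (d + 1) = pvStray l (i + 1) d := by
  rw [pvStray]; simp [h, h1]

theorem pvStray_other (l : List Char) (i : Nat) (d : Nat) (h : i < l.length) (h1 : l[i] ≠ '(') (h2 : l[i] ≠ ')') :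
    pvStray l i d = pvStray l (i + 1) d := by
  rw [pvStray]; simp [h, h1, h2]

theorem pvStray_bounds (l : List Char) (i : Nat) (d : Nat) (e : Nat) (hm : pvStray l i d = some e) :
    i ≤ e ∧ e < l.length ∧ l[e]? = some ')' := by
  by_cases h : i < l.length
  · by_cases h1 : l[i] = '('
    · rw [pvStray_open l i d h h1] at hm
      have := pvStray_bounds l (i + 1) _ _ hm
      exact ⟨by omega, this.2⟩
    · by_cases h2 : l[i] = ')'
      · cases d with
        | zero =>
          rw [pvStray_close0 l i h h2] at hm
          have he : e = i := by simpa using hm.symm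
          subst he
          exact ⟨le_refl _, h, by rw [List.getElem?_eq_getElem h, h2]⟩
        | succ d' =>
          rw [pvStray_closeS l i d' h h2] at hm
          have := pvStray_bounds l (i + 1) _ _ hm
          exact ⟨by omega, this.2⟩
      · rw [pvStray_other l i d h h1 h2] at hm
        have := pvStray_bounds l (i + 1) _ _ hm
        exact ⟨by omega, this.2⟩
  · rw [pvStray_end l i d h] at hm; cases hm
termination_by l.length - i
decreasing_by all_goals omega

theorem pvGetE (l : List Char) (e : Nat) (c : Char) (he : e < l.length) (h : l[e]? = some c) : l[e] = c := by
  rw [List.getElem?_eq_getElem he] at h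
  exact Option.some.inj h

-- a scan at depth d₁+d₂+1 decomposes: it first falls to depth d₂ (at the ')' a scan
-- at depth d₁ stops on), then continues
theorem pvChain (l : List Char) (i d₁ d₂ e : Nat) :
    pvStray l i (d₁ + d₂ + 1) = some e ↔ ∃ j, pvStray l i d₁ = some j ∧ pvStray l (j + 1) d₂ = some e := by
  by_cases h : i < l.length
  · by_cases h1 : l[i] = '('
    · simp only [pvStray_open l i _ h h1]
      rw [show d₁ + d₂ + 1 + 1 = (d₁ + 1) + d₂ + 1 from by omega]
      exact pvChain l (i + 1) (d₁ + 1) d₂ e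
    · by_cases h2 : l[i] = ')'
      · cases d₁ with
        | zero =>
          rw [show 0 + d₂ + 1 = d₂ + 1 from by omega, pvStray_closeS l i d₂ h h2]
          simp only [pvStray_close0 l i h h2]
          constructor
          · intro he; exact ⟨i, rfl, he⟩
          · rintro ⟨j, hj, he⟩
            have : i = j := by simpa using hj
            subst this; exact he
        | succ d₁' =>
          rw [show d₁' + 1 + d₂ + 1 = (d₁' + d₂ + 1) + 1 from by omega, pvStray_closeS l i _ h h2]
          simp only [pvStray_closeS l i d₁' h h2]
          exact pvChain l (i + 1) d₁' d₂ e
      · simp only [pvStray_other l i _ h h1 h2]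
        exact pvChain l (i + 1) d₁ d₂ e
  · simp [pvStray_end l i _ h]
termination_by l.length - i
decreasing_by all_goals omega

-- A's paren scan is the spec scan shifted by one depth level
theorem pvFM (l : List Char) (i : Nat) (d : Nat) : pvFindMatch l i ((d : Int) + 1) = pvStray l i d := by
  by_cases h : i < l.length
  · rw [pvFindMatch, pvStray]
    simp only [h, dif_pos]
    by_cases h1 : l[i] = '('
    · rw [if_pos h1, if_pos h1,
          show ((d : Int) + 1) + 1 = ((d + 1 : Nat) : Int) + 1 from by push_cast; ring]
      exact pvFM l (i + 1) (d + 1)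
    · by_cases h2 : l[i] = ')'
      · rw [if_neg h1, if_neg h1, if_pos h2, if_pos h2]
        cases d with
        | zero =>
          rw [if_pos (show ((0 : Nat) : Int) + 1 - 1 = 0 from by norm_num), if_pos rfl]
        | succ d' =>
          rw [if_neg (show ¬(((d' + 1 : Nat) : Int) + 1 - 1 = 0) from by push_cast; omega),
              if_neg (show ¬(d' + 1 = 0) from by omega),
              show ((d' + 1 : Nat) : Int) + 1 - 1 = ((d' : Nat) : Int) + 1 from by push_cast; ring,
              show d' + 1 - 1 = d' from by omega]
          exact pvFM l (i + 1) d'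
      · rw [if_neg h1, if_neg h1, if_neg h2, if_neg h2]
        exact pvFM l (i + 1) d
  · rw [pvFindMatch, pvStray]; simp [h]
termination_by l.length - i
decreasing_by all_goals omega

theorem pvFM0 (l : List Char) (i : Nat) (h : i < l.length) (hc : l[i] = '(') :
    pvFindMatch l i 0 = pvStray l (i + 1) 0 := by
  rw [pvFindMatch]
  simp only [h, dif_pos, hc, if_pos]
  rw [show (0 : Int) + 1 = ((0 : Nat) : Int) + 1 from by norm_num]
  exact pvFM l (i + 1) 0

-- a scan that stays strictly below e is the same scan on the slice l[i:e]
theorem pvSL (l : List Char) (i e : Nat) (he : e ≤ l.length) (p d j : Nat)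
    (hm : pvStray l (i + p) d = some j) (hj : j < e) :
    pvStray ((l.drop i).take (e - i)) p d = some (j - i) := by
  have hb := pvStray_bounds l (i + p) d j hm
  have hip : i + p < l.length := by omega
  have hpS : p < ((l.drop i).take (e - i)).length := by
    rw [List.length_take, List.length_drop]; omega
  have hSp : ((l.drop i).take (e - i))[p]'hpS = l[i + p]'hip := by
    simp only [List.getElem_take, List.getElem_drop]
  by_cases h1 : l[i + p]'hip = '('
  · rw [pvStray_open _ p d hpS (by rw [hSp]; exact h1), pvStray_open l (i + p) d hip h1] at *
    exact pvSL l i e he (p + 1) (d + 1) j (by rw [show i + (p + 1) = i + p + 1 from by omega]; exact hm) hj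
  · by_cases h2 : l[i + p]'hip = ')'
    · cases d with
      | zero =>
        rw [pvStray_close0 l (i + p) hip h2] at hm
        have : j = i + p := by simpa using hm.symm
        subst this
        rw [pvStray_close0 _ p hpS (by rw [hSp]; exact h2)]
        congr 1; omega
      | succ d' =>
        rw [pvStray_closeS _ p d' hpS (by rw [hSp]; exact h2)]
        rw [pvStray_closeS l (i + p) d' hip h2] at hm
        exact pvSL l i e he (p + 1) d' j (by rw [show i + (p + 1) = i + p + 1 from by omega]; exact hm) hj
    · rw [pvStray_other _ p d hpS (by rw [hSp]; exact h1) (by rw [hSp]; exact h2)]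
      rw [pvStray_other l (i + p) d hip h1 h2] at hm
      exact pvSL l i e he (p + 1) d j (by rw [show i + (p + 1) = i + p + 1 from by omega]; exact hm) hj
termination_by l.length - (i + p)
decreasing_by all_goals omega

-- the two copies of the unary while-loop agree
theorem pvUnaryAB (l : List Char) (i : Nat) (a : String) : pvUnaryA l i a = pvUnaryB l i a := by
  rw [pvUnaryA, pvUnaryB]
  split_ifs with h h1 h2
  · exact pvUnaryAB l (i + 1) (a ++ a ++ "*")
  · exact pvUnaryAB l (i + 1) ("(" ++ a ++ "|ε)")
  · rfl
  · rfl
termination_by l.length - i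
decreasing_by all_goals omega

-- the unary loop stays in range and moves only over '+'/'?', so it preserves pvStray
theorem pvUnaryB_facts (l : List Char) (i : Nat) (a : String) (hi : i ≤ l.length) :
    (pvUnaryB l i a).2 ≤ l.length ∧ ∀ d, pvStray l ((pvUnaryB l i a).2) d = pvStray l i d := by
  rw [pvUnaryB]
  split_ifs with h h1 h2
  · have ih := pvUnaryB_facts l (i + 1) (a ++ a ++ "*") (by omega)
    refine ⟨ih.1, fun d => ?_⟩
    rw [ih.2 d, ← pvStray_other l i d h (by simp [h1]) (by simp [h1])]
  · have ih := pvUnaryB_facts l (i + 1) ("(" ++ a ++ "|ε)") (by omega)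
    refine ⟨ih.1, fun d => ?_⟩
    rw [ih.2 d, ← pvStray_other l i d h (by simp [h2]) (by simp [h2])]
  · exact ⟨by omega, fun d => rfl⟩
  · exact ⟨hi, fun d => rfl⟩
termination_by l.length - i
decreasing_by all_goals omega

-- on the slice l[i:e] with l[e] = ')' the unary loop agrees with the full-string one
theorem pvUN (l : List Char) (i e : Nat) (hel : e < l.length) (hce : l[e]? = some ')')
    (p : Nat) (a : String) (hpe : i + p ≤ e) :
    pvUnaryA ((l.drop i).take (e - i)) p a = ((pvUnaryB l (i + p) a).1, (pvUnaryB l (i + p) a).2 - i) ∧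
    i + p ≤ (pvUnaryB l (i + p) a).2 ∧ (pvUnaryB l (i + p) a).2 ≤ e := by
  by_cases hq : i + p = e
  · have hplen : ¬ p < ((l.drop i).take (e - i)).length := by
      rw [List.length_take, List.length_drop]; omega
    have hcc : l[i + p]'(by omega) = ')' := by
      have := pvGetE l e ')' hel hce
      simp only [hq]; exact this
    have hBq : pvUnaryB l (i + p) a = (a, i + p) := by
      rw [pvUnaryB, dif_pos (show i + p < l.length from by omega)]
      rw [if_neg (by simp [hcc]), if_neg (by simp [hcc])]
    rw [pvUnaryA, dif_neg hplen, hBq]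
    refine ⟨?_, by omega, by omega⟩
    rw [show i + p - i = p from by omega]
  · have hlt : i + p < e := by omega
    have hpS : p < ((l.drop i).take (e - i)).length := by
      rw [List.length_take, List.length_drop]; omega
    have hSp : ((l.drop i).take (e - i))[p]'hpS = l[i + p]'(by omega) := by
      simp only [List.getElem_take, List.getElem_drop]
    rw [pvUnaryA, dif_pos hpS, pvUnaryB, dif_pos (show i + p < l.length from by omega)]
    simp only [hSp]
    by_cases h1 : l[i + p]'(by omega : i + p < l.length) = '+'
    · rw [if_pos h1, if_pos h1]
      have ih := pvUN l i e hel hce (p + 1) (a ++ a ++ "*") (by omega)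
      rw [show i + (p + 1) = i + p + 1 from by omega] at ih
      exact ⟨ih.1, by omega, ih.2.2⟩
    · rw [if_neg h1, if_neg h1]
      by_cases h2 : l[i + p]'(by omega : i + p < l.length) = '?'
      · rw [if_pos h2, if_pos h2]
        have ih := pvUN l i e hel hce (p + 1) ("(" ++ a ++ "|ε)") (by omega)
        rw [show i + (p + 1) = i + p + 1 from by omega] at ih
        exact ⟨ih.1, by omega, ih.2.2⟩
      · rw [if_neg h2, if_neg h2]
        refine ⟨?_, by omega, by omega⟩
        rw [show i + p - i = p from by omega]
termination_by e - (i + p)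
decreasing_by all_goals omega

-- a parenthesized atom is never one of the core operators
theorem pvParenNotCore (s : String) : ¬ ("(" ++ s ++ ")" = "|" ∨ "(" ++ s ++ ")" = "." ∨ "(" ++ s ++ ")" = "*") := by
  intro h
  have h1 : ("(" : String).length = 1 := rfl
  have h2 : (")" : String).length = 1 := rfl
  have h3 : ("|" : String).length = 1 := by decide
  have h4 : ("." : String).length = 1 := by decide
  have h5 : ("*" : String).length = 1 := by decide
  rcases h with h | h | h <;> have := congrArg String.length h
  · rw [String.length_append, String.length_append, h1, h2, h3] at this; omega
  · rw [String.length_append, String.length_append, h1, h2, h4] at this; omega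
  · rw [String.length_append, String.length_append, h1, h2, h5] at this; omega

-- the end-of-string case of the bridge correspondence pvMain
theorem pvMainBase (l : List Char) (q : Nat) (hq : q = l.length) :
    ((∀ parts, pvParseB l q false parts = (pvLoopA l q parts).map (fun r => (String.join r, l.length))) ∧
     (∀ i e parts, i ≤ q → pvStray l q 0 = some e →
        pvParseB l q true parts = (pvLoopA ((l.drop i).take (e - i)) (q - i) parts).map (fun r => (String.join r, e))) ∧
     (∀ parts, pvStray l q 0 = none → pvParseB l q true parts = none ∨ ∃ s, pvParseB l q true parts = some (s, l.length))) := by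
  subst hq
  refine ⟨?_, ?_, ?_⟩
  · intro parts
    rw [pvParseB, pvLoopA]
    simp
  · intro i e parts hi hs
    have hb := pvStray_bounds l _ _ _ hs
    omega
  · intro parts _
    right
    exact ⟨String.join parts, by rw [pvParseB]; simp⟩

-- correspondence between A's loop (recursing on slices) and the bridge pvParseB
theorem pvMain (l : List Char) : ∀ n q, l.length - q ≤ n → q ≤ l.length →
    ((∀ parts, pvParseB l q false parts = (pvLoopA l q parts).map (fun r => (String.join r, l.length))) ∧
     (∀ i e parts, i ≤ q → pvStray l q 0 = some e →
        pvParseB l q true parts = (pvLoopA ((l.drop i).take (e - i)) (q - i) parts).map (fun r => (String.join r, e))) ∧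
     (∀ parts, pvStray l q 0 = none → pvParseB l q true parts = none ∨ ∃ s, pvParseB l q true parts = some (s, l.length))) := by
  intro n
  induction n with
  | zero =>
    intro q hn hq
    exact pvMainBase l q (by omega)
  | succ n ihn =>
    intro q hn hq
    by_cases hql : q < l.length
    case neg => exact pvMainBase l q (by omega)
    case pos =>
    by_cases hPQ : (l[q]'hql = '+' ∨ l[q]'hql = '?')
    · -- unary operator reached by the loop: both raise
      refine ⟨?_, ?_, ?_⟩
      · intro parts
        rw [pvParseB, pvLoopA]
        simp [hql, hPQ]
      · intro i e parts hi hs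
        have hb := pvStray_bounds l q 0 e hs
        have hC : l[q]'hql ≠ ')' := by rcases hPQ with h | h <;> simp [h]
        have hqe : q < e := by
          rcases Nat.lt_or_ge q e with h | h
          · exact h
          · exfalso
            have : q = e := by omega
            subst this
            exact hC (pvGetE l q ')' hql hb.2.2)
        have hkS : q - i < ((l.drop i).take (e - i)).length := by
          rw [List.length_take, List.length_drop]; omega
        have hSq : ((l.drop i).take (e - i))[q - i]'hkS = l[q]'hql := by
          simp only [List.getElem_take, List.getElem_drop]
          congr 1
          omega
        rw [pvParseB, dif_pos hql, if_pos hPQ, pvLoopA, dif_pos hkS, if_pos (by rw [hSq]; exact hPQ)]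
        simp
      · intro parts _
        left
        rw [pvParseB, dif_pos hql, if_pos hPQ]
    · by_cases hC : l[q]'hql = ')'
      · -- ')' reached by the loop: stray char at top level, group end when nested
        have hsq : pvStray l q 0 = some q := pvStray_close0 l q hql hC
        have hnO : ¬ l[q]'hql = '(' := by simp [hC]
        refine ⟨?_, ?_, ?_⟩
        · intro parts
          rw [pvParseB, dif_pos hql, if_neg hPQ, if_neg (by simp), if_neg hnO,
              pvLoopA, dif_pos hql, if_neg hPQ, if_neg hnO]
          by_cases hcore : (String.ofList [l[q]'hql] = "|" ∨ String.ofList [l[q]'hql] = "." ∨ String.ofList [l[q]'hql] = "*")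
          · rw [if_pos hcore, if_pos hcore]
            exact (ihn (q + 1) (by omega) (by omega)).1 (parts ++ [String.ofList [l[q]'hql]])
          · rw [if_neg hcore, if_neg hcore, pvUnaryAB]
            have hge := pvUnaryB_ge l (q + 1) (String.ofList [l[q]'hql])
            have hf := pvUnaryB_facts l (q + 1) (String.ofList [l[q]'hql]) (by omega)
            exact (ihn (pvUnaryB l (q + 1) (String.ofList [l[q]'hql])).2 (by omega) (by omega)).1 _
        · intro i e parts hi hs
          rw [hsq] at hs
          have he : q = e := by simpa using hs
          subst he
          rw [pvParseB, dif_pos hql, if_neg hPQ, if_pos ⟨hC, rfl⟩,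
              pvLoopA, dif_neg (show ¬ (q - i < ((l.drop i).take (q - i)).length) from by rw [List.length_take, List.length_drop]; omega)]
          simp
        · intro parts hnone
          rw [hsq] at hnone
          cases hnone
      · by_cases hO : l[q]'hql = '('
        · -- '(' reached by the loop: the group case
          have hFM : pvFindMatch l q 0 = pvStray l (q + 1) 0 := pvFM0 l q hql hO
          have hstep1 : pvStray l q 0 = pvStray l (q + 1) 1 := by
            simpa using pvStray_open l q 0 hql hO
          refine ⟨?_, ?_, ?_⟩
          · -- mode a (top level)
            intro parts
            rw [pvParseB, dif_pos hql, if_neg hPQ, if_neg (by simp), if_pos hO,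
                pvLoopA, dif_pos hql, if_neg hPQ, if_pos hO, hFM]
            cases hInner : pvStray l (q + 1) 0 with
            | none =>
              rcases (ihn (q + 1) (by omega) (by omega)).2.2 [] hInner with hB | ⟨s, hB⟩
              · rw [hB]; simp
              · rw [hB]; simp
            | some j =>
              have hjb := pvStray_bounds l (q + 1) 0 j hInner
              have hBi := (ihn (q + 1) (by omega) (by omega)).2.1 (q + 1) j [] (le_refl _) hInner
              rw [Nat.sub_self] at hBi
              have hsl : PySem.List.slice l (some ((q : Int) + 1)) (some (j : Int)) = (l.drop (q + 1)).take (j - (q + 1)) := by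
                rw [show ((q : Int) + 1) = ((q + 1 : Nat) : Int) from by push_cast; ring, PySem.List.slice_natCast]
              rw [hBi]
              simp only [Option.bind_some]
              rw [dif_pos (show q ≤ j ∧ j < l.length from by omega), hsl]
              cases hR : pvLoopA ((l.drop (q + 1)).take (j - (q + 1))) 0 [] with
              | none => simp
              | some r =>
                simp only [Option.map_some, Option.bind_some]
                rw [dif_pos hjb.2.1, dif_pos (show q < j from by omega)]
                rw [if_neg (pvParenNotCore (String.join r)), if_neg (pvParenNotCore (String.join r))]
                rw [pvUnaryAB]
                have hge := pvUnaryB_ge l (j + 1) ("(" ++ String.join r ++ ")")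
                have hf := pvUnaryB_facts l (j + 1) ("(" ++ String.join r ++ ")") (by omega)
                exact (ihn (pvUnaryB l (j + 1) ("(" ++ String.join r ++ ")")).2 (by omega) (by omega)).1 _
          · -- mode b (inside a group whose ')' is at e)
            intro i e parts hi hs
            rw [hstep1] at hs
            obtain ⟨j, hInner, hAfter⟩ := (pvChain l (q + 1) 0 0 e).mp (by simpa using hs)
            have hjb := pvStray_bounds l (q + 1) 0 j hInner
            have heb := pvStray_bounds l (j + 1) 0 e hAfter
            have hel : e < l.length := heb.2.1
            have hkS : q - i < ((l.drop i).take (e - i)).length := by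
              rw [List.length_take, List.length_drop]; omega
            have hSq : ((l.drop i).take (e - i))[q - i]'hkS = l[q]'hql := by
              simp only [List.getElem_take, List.getElem_drop]
              congr 1
              omega
            have hFMS : pvFindMatch ((l.drop i).take (e - i)) (q - i) 0 = some (j - i) := by
              rw [pvFM0 _ _ hkS (by rw [hSq]; exact hO)]
              have := pvSL l i e (by omega) (q - i + 1) 0 j
                (by rw [show i + (q - i + 1) = q + 1 from by omega]; exact hInner) (by omega)
              rw [show q - i + 1 = (q - i) + 1 from rfl] at this
              exact this
            have hslS : PySem.List.slice ((l.drop i).take (e - i)) (some (((q - i : Nat) : Int) + 1)) (some ((j - i : Nat) : Int)) = (l.drop (q + 1)).take (j - (q + 1)) := by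
              rw [show (((q - i : Nat)) : Int) + 1 = ((q - i + 1 : Nat) : Int) from by push_cast; ring,
                  PySem.List.slice_natCast, List.drop_take, List.drop_drop, List.take_take]
              rw [show i + (q - i + 1) = q + 1 from by omega,
                  show min (j - i - (q - i + 1)) (e - i - (q - i + 1)) = j - (q + 1) from by omega]
            have hBi := (ihn (q + 1) (by omega) (by omega)).2.1 (q + 1) j [] (le_refl _) hInner
            rw [Nat.sub_self] at hBi
            rw [pvParseB, dif_pos hql, if_neg hPQ, if_neg (by simp [hO]), if_pos hO,
                pvLoopA, dif_pos hkS,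
                if_neg (show ¬(((l.drop i).take (e - i))[q - i]'hkS = '+' ∨ ((l.drop i).take (e - i))[q - i]'hkS = '?') from by rw [hSq]; exact hPQ),
                if_pos (show ((l.drop i).take (e - i))[q - i]'hkS = '(' from by rw [hSq]; exact hO), hFMS]
            simp only [Option.bind_some]
            rw [dif_pos (show q - i ≤ j - i ∧ j - i < ((l.drop i).take (e - i)).length from by rw [List.length_take, List.length_drop]; omega), hslS, hBi]
            cases hR : pvLoopA ((l.drop (q + 1)).take (j - (q + 1))) 0 [] with
            | none => simp
            | some r =>
              simp only [Option.map_some, Option.bind_some]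
              rw [dif_pos (show j < l.length from by omega), dif_pos (show q < j from by omega)]
              rw [if_neg (pvParenNotCore (String.join r)), if_neg (pvParenNotCore (String.join r))]
              have hun := pvUN l i e hel heb.2.2 (j - i + 1) ("(" ++ String.join r ++ ")") (by omega)
              rw [show i + (j - i + 1) = j + 1 from by omega] at hun
              rw [hun.1]
              have hf := pvUnaryB_facts l (j + 1) ("(" ++ String.join r ++ ")") (by omega)
              have hnext := (ihn (pvUnaryB l (j + 1) ("(" ++ String.join r ++ ")")).2 (by omega) (by omega)).2.1 i e
                (parts ++ [(pvUnaryB l (j + 1) ("(" ++ String.join r ++ ")")).1]) (by omega)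
                (by rw [hf.2 0]; exact hAfter)
              exact hnext
          · -- mode c (inside an unterminated group)
            intro parts hnone
            rw [hstep1] at hnone
            rw [pvParseB, dif_pos hql, if_neg hPQ, if_neg (by simp [hO]), if_pos hO]
            cases hInner : pvStray l (q + 1) 0 with
            | none =>
              rcases (ihn (q + 1) (by omega) (by omega)).2.2 [] hInner with hB | ⟨s, hB⟩
              · left; rw [hB]; simp
              · left; rw [hB]; simp
            | some j =>
              have hAfter : pvStray l (j + 1) 0 = none := by
                cases hA : pvStray l (j + 1) 0 with
                | none => rfl
                | some e =>
                  exfalso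
                  have := (pvChain l (q + 1) 0 0 e).mpr ⟨j, hInner, hA⟩
                  simp only [show (0 + 0 + 1 : Nat) = 1 from rfl] at this
                  rw [this] at hnone
                  cases hnone
              have hjb := pvStray_bounds l (q + 1) 0 j hInner
              have hBi := (ihn (q + 1) (by omega) (by omega)).2.1 (q + 1) j [] (le_refl _) hInner
              rw [Nat.sub_self] at hBi
              rw [hBi]
              cases hR : pvLoopA ((l.drop (q + 1)).take (j - (q + 1))) 0 [] with
              | none => left; simp
              | some r =>
                simp only [Option.map_some, Option.bind_some]
                rw [dif_pos hjb.2.1, dif_pos (show q < j from by omega)]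
                rw [if_neg (pvParenNotCore (String.join r))]
                have hf := pvUnaryB_facts l (j + 1) ("(" ++ String.join r ++ ")") (by omega)
                have hge := pvUnaryB_ge l (j + 1) ("(" ++ String.join r ++ ")")
                exact (ihn (pvUnaryB l (j + 1) ("(" ++ String.join r ++ ")")).2 (by omega) (by omega)).2.2
                  (parts ++ [(pvUnaryB l (j + 1) ("(" ++ String.join r ++ ")")).1]) (by rw [hf.2 0]; exact hAfter)
        · -- ordinary character
          have hstepc : ∀ d, pvStray l q d = pvStray l (q + 1) d := fun d => pvStray_other l q d hql hO hC
          refine ⟨?_, ?_, ?_⟩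
          · intro parts
            rw [pvParseB, dif_pos hql, if_neg hPQ, if_neg (by simp), if_neg hO,
                pvLoopA, dif_pos hql, if_neg hPQ, if_neg hO]
            by_cases hcore : (String.ofList [l[q]'hql] = "|" ∨ String.ofList [l[q]'hql] = "." ∨ String.ofList [l[q]'hql] = "*")
            · rw [if_pos hcore, if_pos hcore]
              exact (ihn (q + 1) (by omega) (by omega)).1 _
            · rw [if_neg hcore, if_neg hcore, pvUnaryAB]
              have hge := pvUnaryB_ge l (q + 1) (String.ofList [l[q]'hql])
              have hf := pvUnaryB_facts l (q + 1) (String.ofList [l[q]'hql]) (by omega)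
              exact (ihn (pvUnaryB l (q + 1) (String.ofList [l[q]'hql])).2 (by omega) (by omega)).1 _
          · intro i e parts hi hs
            have hb := pvStray_bounds l q 0 e hs
            have hqe : q < e := by
              rcases Nat.lt_or_ge q e with h | h
              · exact h
              · exfalso
                have : q = e := by omega
                subst this
                exact hC (pvGetE l q ')' hql hb.2.2)
            have hkS : q - i < ((l.drop i).take (e - i)).length := by
              rw [List.length_take, List.length_drop]; omega
            have hSq : ((l.drop i).take (e - i))[q - i]'hkS = l[q]'hql := by
              simp only [List.getElem_take, List.getElem_drop]
              congr 1
              omega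
            have hs1 : pvStray l (q + 1) 0 = some e := by rw [← hstepc 0]; exact hs
            rw [pvParseB, dif_pos hql, if_neg hPQ, if_neg (by simp [hC]), if_neg hO,
                pvLoopA, dif_pos hkS,
                if_neg (show ¬(((l.drop i).take (e - i))[q - i]'hkS = '+' ∨ ((l.drop i).take (e - i))[q - i]'hkS = '?') from by rw [hSq]; exact hPQ),
                if_neg (show ¬(((l.drop i).take (e - i))[q - i]'hkS = '(') from by rw [hSq]; exact hO)]
            simp only [hSq]
            by_cases hcore : (String.ofList [l[q]'hql] = "|" ∨ String.ofList [l[q]'hql] = "." ∨ String.ofList [l[q]'hql] = "*")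
            · rw [if_pos hcore, if_pos hcore]
              have := (ihn (q + 1) (by omega) (by omega)).2.1 i e (parts ++ [String.ofList [l[q]'hql]]) (by omega) hs1
              rw [show (q + 1) - i = (q - i) + 1 from by omega] at this
              exact this
            · rw [if_neg hcore, if_neg hcore]
              have hun := pvUN l i e hb.2.1 hb.2.2 (q - i + 1) (String.ofList [l[q]'hql]) (by omega)
              rw [show i + (q - i + 1) = q + 1 from by omega] at hun
              rw [hun.1]
              have hf := pvUnaryB_facts l (q + 1) (String.ofList [l[q]'hql]) (by omega)
              have hnext := (ihn (pvUnaryB l (q + 1) (String.ofList [l[q]'hql])).2 (by omega) (by omega)).2.1 i e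
                (parts ++ [(pvUnaryB l (q + 1) (String.ofList [l[q]'hql])).1]) (by omega)
                (by rw [hf.2 0]; exact hs1)
              exact hnext
          · intro parts hnone
            have hn1 : pvStray l (q + 1) 0 = none := by rw [← hstepc 0]; exact hnone
            rw [pvParseB, dif_pos hql, if_neg hPQ, if_neg (by simp [hC]), if_neg hO]
            by_cases hcore : (String.ofList [l[q]'hql] = "|" ∨ String.ofList [l[q]'hql] = "." ∨ String.ofList [l[q]'hql] = "*")
            · rw [if_pos hcore]
              exact (ihn (q + 1) (by omega) (by omega)).2.2 _ hn1
            · rw [if_neg hcore]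
              have hf := pvUnaryB_facts l (q + 1) (String.ofList [l[q]'hql]) (by omega)
              have hge := pvUnaryB_ge l (q + 1) (String.ofList [l[q]'hql])
              exact (ihn (pvUnaryB l (q + 1) (String.ofList [l[q]'hql])).2 (by omega) (by omega)).2.2 _
                (by rw [hf.2 0]; exact hn1)

-- ===== correspondence between the bridge pvParseB and B's stack machine =====

-- a string of length ≠ 1 is not a core operator
theorem pvNotCore (s : String) (h : s.length ≠ 1) : ¬ (s = "|" ∨ s = "." ∨ s = "*") := by
  intro hc
  rcases hc with hc | hc | hc <;> subst hc <;> exact h (by decide)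

-- the bridge never stops before its start index
theorem pvParseB_ge (l : List Char) (i : Nat) (nested : Bool) (parts : List String)
    (s : String) (j : Nat) (hm : pvParseB l i nested parts = some (s, j)) : i ≤ j := by
  by_cases h : i < l.length
  · rw [pvParseB, dif_pos h] at hm
    by_cases h1 : (l[i] = '+' ∨ l[i] = '?')
    · rw [if_pos h1] at hm; cases hm
    · rw [if_neg h1] at hm
      by_cases h2 : (l[i] = ')' ∧ nested = true)
      · rw [if_pos h2] at hm
        simp only [Option.some.injEq, Prod.mk.injEq] at hm
        omega
      · rw [if_neg h2] at hm
        by_cases h3 : l[i] = '('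
        · rw [if_pos h3] at hm
          rw [Option.bind_eq_some_iff] at hm
          obtain ⟨ij, hij, hm⟩ := hm
          split_ifs at hm with hjl hij2 hcore
          · have := pvParseB_ge l (ij.2 + 1) nested _ s j hm
            omega
          · have hge := pvUnaryB_ge l (ij.2 + 1) ("(" ++ ij.1 ++ ")")
            have := pvParseB_ge l (pvUnaryB l (ij.2 + 1) ("(" ++ ij.1 ++ ")")).2 nested _ s j hm
            omega
        · rw [if_neg h3] at hm
          by_cases h4 : (String.ofList [l[i]] = "|" ∨ String.ofList [l[i]] = "." ∨ String.ofList [l[i]] = "*")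
          · rw [if_pos h4] at hm
            have := pvParseB_ge l (i + 1) nested _ s j hm
            omega
          · rw [if_neg h4] at hm
            have hge := pvUnaryB_ge l (i + 1) (String.ofList [l[i]])
            have := pvParseB_ge l (pvUnaryB l (i + 1) (String.ofList [l[i]])).2 nested _ s j hm
            omega
  · rw [pvParseB, dif_neg h] at hm
    simp only [Option.some.injEq, Prod.mk.injEq] at hm
    omega
termination_by l.length - i
decreasing_by all_goals omega

-- the unary loop stops on a character that is not '+' or '?'
theorem pvUnaryB_stop (l : List Char) (i : Nat) (a : String)
    (h : l[(pvUnaryB l i a).2]? = some '+' ∨ l[(pvUnaryB l i a).2]? = some '?') : False := by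
  rw [pvUnaryB] at h
  split_ifs at h with h0 h1 h2
  · exact pvUnaryB_stop l (i + 1) (a ++ a ++ "*") h
  · exact pvUnaryB_stop l (i + 1) ("(" ++ a ++ "|ε)") h
  · simp only [List.getElem?_eq_getElem h0] at h
    rcases h with h | h <;> [exact h1 (by simpa using h); exact h2 (by simpa using h)]
  · simp only [List.getElem?_eq_none (by omega : l.length ≤ i)] at h
    rcases h with h | h <;> cases h
termination_by l.length - i
decreasing_by all_goals omega

-- the unary transforms preserve 'nonempty' and produce non-core atoms
theorem pvPlusLen (a : String) (ha : a.length ≠ 0) : (a ++ a ++ "*").length ≠ 1 ∧ (a ++ a ++ "*").length ≠ 0 := by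
  rw [String.length_append, String.length_append]
  constructor <;> · simp only [show ("*" : String).length = 1 from by decide]; omega

theorem pvQLen (a : String) : ("(" ++ a ++ "|ε)").length ≠ 1 ∧ ("(" ++ a ++ "|ε)").length ≠ 0 := by
  rw [String.length_append, String.length_append]
  constructor <;> · simp only [show ("(" : String).length = 1 from by decide,
      show ("|ε)" : String).length = 3 from by decide]; omega

theorem pvSingleLen (c : Char) : (String.ofList [c]).length = 1 := by
  rw [← String.length_toList, String.toList_ofList]
  rfl

-- running the machine over a '+'/'?' run equals the unary while-loop
theorem pvU (l : List Char) (i : Nat) (a : String) (cur : List String) (stk : List (List String))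
    (hnc : ¬ (a = "|" ∨ a = "." ∨ a = "*")) (hne : a.length ≠ 0) :
    pvMachine (l.drop i) (a :: cur) stk =
      pvMachine (l.drop (pvUnaryB l i a).2) ((pvUnaryB l i a).1 :: cur) stk := by
  by_cases h : i < l.length
  · rw [pvUnaryB, dif_pos h]
    by_cases h1 : l[i] = '+'
    · rw [if_pos h1, List.drop_eq_getElem_cons h]
      simp only [pvMachine, h1, if_neg hnc]
      exact pvU l (i + 1) (a ++ a ++ "*") cur stk (pvNotCore _ (pvPlusLen a hne).1) (pvPlusLen a hne).2
    · rw [if_neg h1]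
      by_cases h2 : l[i] = '?'
      · rw [if_pos h2, List.drop_eq_getElem_cons h]
        simp only [pvMachine, h2, if_neg hnc]
        exact pvU l (i + 1) ("(" ++ a ++ "|ε)") cur stk (pvNotCore _ (pvQLen a).1) (pvQLen a).2
      · rw [if_neg h2]
  · rw [pvUnaryB, dif_neg h]
termination_by l.length - i
decreasing_by all_goals omega

-- MAIN simulation: the stack machine equals the bridge; each suspended frame on the
-- machine's stack is the (reversed) parts list of an enclosing bridge call
theorem pvSim (l : List Char) : ∀ n i parts, l.length - i ≤ n → i ≤ l.length →
    ((l[i]? = some '+' ∨ l[i]? = some '?') →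
      (parts = [] ∨ ∃ a t, parts.reverse = a :: t ∧ (a = "|" ∨ a = "." ∨ a = "*"))) →
    ((pvMachine (l.drop i) parts.reverse [] = (pvParseB l i false parts).map (fun sj => sj.1)) ∧
     (∀ outer more, pvMachine (l.drop i) parts.reverse (outer :: more) =
        (pvParseB l i true parts).bind (fun sj =>
          if sj.2 < l.length then pvMachine (l.drop (sj.2 + 1)) (("(" ++ sj.1 ++ ")") :: outer) more
          else none))) := by
  intro n
  induction n with
  | zero =>
    intro i parts hn hq _
    have hi : i = l.length := by omega
    subst hi
    rw [List.drop_length]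
    constructor
    · rw [pvParseB, dif_neg (by omega)]
      simp [pvMachine]
    · intro outer more
      rw [pvParseB, dif_neg (by omega)]
      simp [pvMachine]
  | succ n ihn =>
    intro i parts hn hq H
    by_cases hql : i < l.length
    case neg =>
      have hi : i = l.length := by omega
      subst hi
      rw [List.drop_length]
      constructor
      · rw [pvParseB, dif_neg (by omega)]
        simp [pvMachine]
      · intro outer more
        rw [pvParseB, dif_neg (by omega)]
        simp [pvMachine]
    case pos =>
    rw [List.drop_eq_getElem_cons hql]
    by_cases hPQ : (l[i]'hql = '+' ∨ l[i]'hql = '?')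
    · -- '+'/'?' at the loop head: both sides raise (H pins the machine state)
      have hmach : ∀ stk, pvMachine (l[i] :: l.drop (i + 1)) parts.reverse stk = none := by
        intro stk
        rcases H (by rcases hPQ with h | h <;> [left; right] <;>
          rw [List.getElem?_eq_getElem hql, h]) with hp | ⟨a, t, hrev, hcore⟩
        · subst hp
          simp only [pvMachine, if_pos hPQ, List.reverse_nil]
        · rw [hrev]
          simp only [pvMachine, if_pos hPQ, if_pos hcore]
      constructor
      · rw [hmach [], pvParseB, dif_pos hql, if_pos hPQ]
        rfl
      · intro outer more
        rw [hmach (outer :: more), pvParseB, dif_pos hql, if_pos hPQ]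
        rfl
    · by_cases hO : l[i]'hql = '('
      · -- '(' : the machine pushes a frame; the bridge recurses
        have hstep : ∀ stk, pvMachine (l[i] :: l.drop (i + 1)) parts.reverse stk =
            pvMachine (l.drop (i + 1)) [] (parts.reverse :: stk) := by
          intro stk
          simp [pvMachine, hO]
        have hinner := (ihn (i + 1) [] (by omega) (by omega) (fun _ => Or.inl rfl)).2
        simp only [List.reverse_nil] at hinner
        constructor
        · rw [hstep [], pvParseB, dif_pos hql, if_neg hPQ, if_neg (by simp), if_pos hO,
              hinner parts.reverse []]
          cases hP : pvParseB l (i + 1) true [] with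
          | none => simp
          | some sj =>
            obtain ⟨s, j⟩ := sj
            have hge : i + 1 ≤ j := pvParseB_ge l (i + 1) true [] s j hP
            simp only [Option.bind_some]
            by_cases hjl : j < l.length
            · rw [if_pos hjl, dif_pos hjl, dif_pos (show i < j from by omega),
                  if_neg (pvParenNotCore s)]
              have hf := pvUnaryB_facts l (j + 1) ("(" ++ s ++ ")") (by omega)
              have hge2 := pvUnaryB_ge l (j + 1) ("(" ++ s ++ ")")
              rw [pvU l (j + 1) ("(" ++ s ++ ")") parts.reverse [] (pvParenNotCore s)
                    (by rw [String.length_append, String.length_append]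
                        simp only [show ("(" : String).length = 1 from by decide]; omega)]
              have hIH := (ihn (pvUnaryB l (j + 1) ("(" ++ s ++ ")")).2
                  (parts ++ [(pvUnaryB l (j + 1) ("(" ++ s ++ ")")).1]) (by omega) (by omega)
                  (fun hcontra => absurd hcontra (fun hc => pvUnaryB_stop l (j + 1) _ hc))).1
              rw [show (parts ++ [(pvUnaryB l (j + 1) ("(" ++ s ++ ")")).1]).reverse =
                    (pvUnaryB l (j + 1) ("(" ++ s ++ ")")).1 :: parts.reverse from by
                simp] at hIH
              rw [hIH]
            · rw [if_neg hjl, dif_neg hjl]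
              simp
        · intro outer more
          rw [hstep (outer :: more), pvParseB, dif_pos hql, if_neg hPQ, if_neg (by simp [hO]), if_pos hO,
              hinner parts.reverse (outer :: more)]
          cases hP : pvParseB l (i + 1) true [] with
          | none => simp
          | some sj =>
            obtain ⟨s, j⟩ := sj
            have hge : i + 1 ≤ j := pvParseB_ge l (i + 1) true [] s j hP
            simp only [Option.bind_some]
            by_cases hjl : j < l.length
            · rw [if_pos hjl, dif_pos hjl, dif_pos (show i < j from by omega),
                  if_neg (pvParenNotCore s)]
              have hf := pvUnaryB_facts l (j + 1) ("(" ++ s ++ ")") (by omega)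
              have hge2 := pvUnaryB_ge l (j + 1) ("(" ++ s ++ ")")
              rw [pvU l (j + 1) ("(" ++ s ++ ")") parts.reverse (outer :: more) (pvParenNotCore s)
                    (by rw [String.length_append, String.length_append]
                        simp only [show ("(" : String).length = 1 from by decide]; omega)]
              have hIH := (ihn (pvUnaryB l (j + 1) ("(" ++ s ++ ")")).2
                  (parts ++ [(pvUnaryB l (j + 1) ("(" ++ s ++ ")")).1]) (by omega) (by omega)
                  (fun hcontra => absurd hcontra (fun hc => pvUnaryB_stop l (j + 1) _ hc))).2 outer more
              rw [show (parts ++ [(pvUnaryB l (j + 1) ("(" ++ s ++ ")")).1]).reverse =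
                    (pvUnaryB l (j + 1) ("(" ++ s ++ ")")).1 :: parts.reverse from by
                simp] at hIH
              rw [hIH]
            · rw [if_neg hjl, dif_neg hjl]
              simp
      · -- an ordinary character (')' included at top level)
        by_cases hC : l[i]'hql = ')'
        · -- ')' : literal at top level (machine stack empty), pop when nested
          constructor
          · -- top level: ')' is an ordinary, non-core atom
            simp only [pvMachine, if_neg hPQ, if_neg hO, if_pos hC]
            rw [pvParseB, dif_pos hql, if_neg hPQ, if_neg (by simp), if_neg hO]
            have hcore : ¬ (String.ofList [l[i]'hql] = "|" ∨ String.ofList [l[i]'hql] = "." ∨ String.ofList [l[i]'hql] = "*") := by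
              rw [hC]; decide
            rw [if_neg hcore]
            have hU := pvU l (i + 1) (String.ofList [l[i]'hql]) parts.reverse [] hcore (by rw [hC]; decide)
            rw [hU]
            have hge := pvUnaryB_ge l (i + 1) (String.ofList [l[i]'hql])
            have hf := pvUnaryB_facts l (i + 1) (String.ofList [l[i]'hql]) (by omega)
            have hIH := (ihn (pvUnaryB l (i + 1) (String.ofList [l[i]'hql])).2
                (parts ++ [(pvUnaryB l (i + 1) (String.ofList [l[i]'hql])).1]) (by omega) (by omega)
                (fun hcontra => absurd hcontra (fun hc => pvUnaryB_stop l (i + 1) _ hc))).1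
            simp only [List.reverse_append, List.reverse_singleton, List.singleton_append] at hIH
            exact hIH
          · -- nested: the machine pops, the bridge returns
            intro outer more
            simp only [pvMachine, if_neg hPQ, if_neg hO, if_pos hC]
            rw [pvParseB, dif_pos hql, if_neg hPQ, if_pos ⟨hC, rfl⟩]
            simp only [Option.bind_some, if_pos hql, List.reverse_reverse]
        · -- plain character: append the atom, then the unary loop
          have hcore_or := Classical.em (String.ofList [l[i]'hql] = "|" ∨ String.ofList [l[i]'hql] = "." ∨ String.ofList [l[i]'hql] = "*")
          have hstep : ∀ stk, pvMachine (l[i] :: l.drop (i + 1)) parts.reverse stk =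
              pvMachine (l.drop (i + 1)) (String.ofList [l[i]] :: parts.reverse) stk := by
            intro stk
            cases stk with
            | nil => simp only [pvMachine, if_neg hPQ, if_neg hO, if_neg hC]
            | cons o m => simp only [pvMachine, if_neg hPQ, if_neg hO, if_neg hC]
          rcases hcore_or with hcore | hcore
          · -- core atom: the bridge appends and continues; a following '+' errors both
            have hHnew : (l[i + 1]? = some '+' ∨ l[i + 1]? = some '?') →
                ((parts ++ [String.ofList [l[i]'hql]]) = [] ∨
                 ∃ a t, (parts ++ [String.ofList [l[i]'hql]]).reverse = a :: t ∧
                   (a = "|" ∨ a = "." ∨ a = "*")) := by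
              intro _
              right
              exact ⟨String.ofList [l[i]'hql], parts.reverse, by simp, hcore⟩
            have hIH := ihn (i + 1) (parts ++ [String.ofList [l[i]'hql]]) (by omega) (by omega) hHnew
            constructor
            · rw [hstep [], pvParseB, dif_pos hql, if_neg hPQ, if_neg (by simp [hC]), if_neg hO, if_pos hcore]
              have := hIH.1
              rw [show (parts ++ [String.ofList [l[i]'hql]]).reverse =
                    String.ofList [l[i]'hql] :: parts.reverse from by simp] at this
              exact this
            · intro outer more
              rw [hstep (outer :: more), pvParseB, dif_pos hql, if_neg hPQ, if_neg (by simp [hC]), if_neg hO, if_pos hcore]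
              have := hIH.2 outer more
              rw [show (parts ++ [String.ofList [l[i]'hql]]).reverse =
                    String.ofList [l[i]'hql] :: parts.reverse from by simp] at this
              exact this
          · -- non-core atom: the machine consumes the '+'/'?' run like pvUnaryB
            have hlen : (String.ofList [l[i]'hql]).length ≠ 0 := by rw [pvSingleLen]; omega
            have hU := pvU l (i + 1) (String.ofList [l[i]'hql]) parts.reverse
            have hge := pvUnaryB_ge l (i + 1) (String.ofList [l[i]'hql])
            have hf := pvUnaryB_facts l (i + 1) (String.ofList [l[i]'hql]) (by omega)
            have hHnew := (fun hcontra => absurd hcontra (fun hc => pvUnaryB_stop l (i + 1) (String.ofList [l[i]'hql]) hc) :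
              (l[(pvUnaryB l (i + 1) (String.ofList [l[i]'hql])).2]? = some '+' ∨
               l[(pvUnaryB l (i + 1) (String.ofList [l[i]'hql])).2]? = some '?') →
              ((parts ++ [(pvUnaryB l (i + 1) (String.ofList [l[i]'hql])).1]) = [] ∨
               ∃ a t, (parts ++ [(pvUnaryB l (i + 1) (String.ofList [l[i]'hql])).1]).reverse = a :: t ∧
                 (a = "|" ∨ a = "." ∨ a = "*")))
            have hIH := ihn (pvUnaryB l (i + 1) (String.ofList [l[i]'hql])).2
                (parts ++ [(pvUnaryB l (i + 1) (String.ofList [l[i]'hql])).1]) (by omega) (by omega) hHnew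
            constructor
            · rw [hstep [], hU [] hcore hlen, pvParseB, dif_pos hql, if_neg hPQ, if_neg (by simp [hC]), if_neg hO, if_neg hcore]
              have := hIH.1
              rw [show (parts ++ [(pvUnaryB l (i + 1) (String.ofList [l[i]'hql])).1]).reverse =
                    (pvUnaryB l (i + 1) (String.ofList [l[i]'hql])).1 :: parts.reverse from by simp] at this
              exact this
            · intro outer more
              rw [hstep (outer :: more), hU (outer :: more) hcore hlen, pvParseB, dif_pos hql, if_neg hPQ, if_neg (by simp [hC]), if_neg hO, if_neg hcore]
              have := hIH.2 outer more
              rw [show (parts ++ [(pvUnaryB l (i + 1) (String.ofList [l[i]'hql])).1]).reverse =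
                    (pvUnaryB l (i + 1) (String.ofList [l[i]'hql])).1 :: parts.reverse from by simp] at this
              exact this

-- ===== VERDICT (by name: the statement is the Claim_ definition above) =====
theorem desugar_unary_ops_py_spec : Claim_equal_desugar_unary_ops_py := by
  intro regex _ _
  unfold Spec_desugar_unary_ops_py desugar_unary_ops_py desugar_unary_ops_py_alt
  have hA := (pvMain regex.toList regex.toList.length 0 (by omega) (by omega)).1 []
  have hB := (pvSim regex.toList regex.toList.length 0 [] (by omega) (by omega)
      (fun _ => Or.inl rfl)).1
  rw [List.drop_zero, List.reverse_nil] at hB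
  rw [hB, hA]
  cases pvLoopA regex.toList 0 [] <;> simp
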